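-- pv_equiv track=rewrite | github.com/perlinm/rey_research | entropy/run.py | primary_subsystems
-- ===== SOURCE A (Python) =====
-- def primary_subsystems(partition):
--     subsystems = []
--     start_idx = 0
--     while start_idx < len(partition):
--         if partition[start_idx] == " ":
--             start_idx += 1
--             continue
--         end_idx = start_idx + 1
--         while end_idx < len(partition) and not partition[end_idx].isalpha():
--             end_idx += 1
--         subsystems.append(partition[start_idx:end_idx])
--         start_idx = end_idx
--     return subsystems
-- ===== SOURCE B (Python) =====
-- def primary_subsystems(partition):
--     # single forward pass: new token at each alphabetic char (or when no token yet),
--     # everything else extends the current token; leading spaces stripped first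
--     partition = partition.lstrip(" ")
--     subsystems = []
--     for ch in partition:
--         if ch.isalpha() or not subsystems:
--             subsystems.append(ch)
--         else:
--             subsystems[-1] += ch
--     return subsystems
-- ===== Notes on version B (the rewrite author's own statement) =====
-- stated objective: simpler
-- what changed: Replaced the nested index-based while-loops with a leading-space strip followed by a single flat character pass that starts a new token at each alphabetic character and appends every other character to the last token.
import Mathlib
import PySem

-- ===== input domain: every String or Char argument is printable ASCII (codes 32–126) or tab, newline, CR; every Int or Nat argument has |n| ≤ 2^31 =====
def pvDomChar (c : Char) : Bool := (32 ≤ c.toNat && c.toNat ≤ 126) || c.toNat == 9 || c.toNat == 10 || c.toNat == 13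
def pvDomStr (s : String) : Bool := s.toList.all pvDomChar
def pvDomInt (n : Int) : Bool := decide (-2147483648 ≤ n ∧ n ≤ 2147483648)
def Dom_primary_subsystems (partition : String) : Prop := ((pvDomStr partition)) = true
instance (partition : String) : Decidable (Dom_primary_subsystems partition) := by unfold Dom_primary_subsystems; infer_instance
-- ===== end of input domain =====

-- B replaces A's nested index-based while-loops by a leading-space strip plus one flat
-- character pass (new token at each alphabetic char, others extend the last token): simpler.

-- ===== PORT A =====
-- inner `while end_idx < len(partition) and not partition[end_idx].isalpha(): end_idx += 1`
def pvInnerA (s : List Char) (j : Nat) : Nat :=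
  if h : j < s.length then
    if !(PySem.Chars.isalpha s[j]) then pvInnerA s (j + 1) else j
  else j
termination_by s.length - j

theorem pvInnerA_ge (s : List Char) (j : Nat) : j ≤ pvInnerA s j := by
  unfold pvInnerA
  split
  · split
    · have := pvInnerA_ge s (j + 1); omega
    · exact Nat.le_refl j
  · exact Nat.le_refl j
termination_by s.length - j

-- outer `while start_idx < len(partition): …` loop
def pvOuterA (s : List Char) (i : Nat) : List (List Char) :=
  if h : i < s.length then
    if s[i] = ' ' then pvOuterA s (i + 1)
    else
      let e := pvInnerA s (i + 1)
      PySem.List.slice s (some (i : Int)) (some (e : Int)) :: pvOuterA s e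
  else []
termination_by s.length - i
decreasing_by
  · omega
  · have := pvInnerA_ge s (i + 1); omega

def primary_subsystems (partition : String) : List String :=
  (pvOuterA partition.toList 0).map (fun t => String.ofList t)

-- ===== PORT B =====
-- `subsystems[-1] += ch`
def pvAppendLast : List (List Char) → Char → List (List Char)
  | [], c => [[c]]
  | [t], c => [t ++ [c]]
  | t :: ts, c => t :: pvAppendLast ts c

def pvStepB (acc : List (List Char)) (c : Char) : List (List Char) :=
  if PySem.Chars.isalpha c || acc.isEmpty then acc ++ [[c]] else pvAppendLast acc c

def primary_subsystems_alt (partition : String) : List String :=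
  -- partition.lstrip(" ") strips exactly the leading ' ' characters
  (((partition.toList.dropWhile (· == ' ')).foldl pvStepB []).map (fun t => String.ofList t))

-- ===== PRECONDITION & SPEC =====
def Spec_primary_subsystems (partition : String) (out : List String) : Prop := out = primary_subsystems_alt partition
instance (partition : String) (out : List String) : Decidable (Spec_primary_subsystems partition out) := by unfold Spec_primary_subsystems; infer_instance

-- ===== CLAIM (what is proved, stated in full; the proofs are below) =====
def Claim_equal_primary_subsystems : Prop := ∀ (partition : String), Dom_primary_subsystems partition → Spec_primary_subsystems partition (primary_subsystems partition)

-- ===== LEMMAS AND PROOFS =====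

-- `P c` = "c is not alphabetic": the characters absorbed into a running token
def pvP (c : Char) : Bool := !(PySem.Chars.isalpha c)

-- canonical recursive description of the token list
def pvOuterL : List Char → List (List Char)
  | [] => []
  | c :: rest =>
    if c = ' ' then pvOuterL rest
    else (c :: rest.takeWhile pvP) :: pvOuterL (rest.dropWhile pvP)
termination_by l => l.length
decreasing_by
  · simp
  · have := List.length_dropWhile_le pvP rest; simp; omega

theorem pvTake_len_takeWhile (l : List Char) : l.take ((l.takeWhile pvP).length) = l.takeWhile pvP := by
  induction l with
  | nil => rfl
  | cons c rest ih =>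
    by_cases h : pvP c
    · simp [h, ih]
    · simp [h]

theorem pvDrop_len_takeWhile (l : List Char) : l.drop ((l.takeWhile pvP).length) = l.dropWhile pvP := by
  induction l with
  | nil => rfl
  | cons c rest ih =>
    by_cases h : pvP c
    · simp [h, ih]
    · simp [h]

theorem pvInnerA_spec (s : List Char) (j : Nat) :
    pvInnerA s j = j + ((s.drop j).takeWhile pvP).length := by
  unfold pvInnerA
  split
  · rename_i h
    rw [List.drop_eq_getElem_cons h, List.takeWhile_cons]
    by_cases ha : PySem.Chars.isalpha s[j]
    · rw [if_neg (by simp [ha]), if_neg (by simp [pvP, ha])]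
      simp
    · rw [if_pos (by simp [ha]), if_pos (by simp [pvP, ha])]
      rw [pvInnerA_spec s (j + 1)]
      simp; omega
  · rename_i h
    rw [List.drop_eq_nil_of_le (by omega)]
    simp
termination_by s.length - j

theorem pvOuterA_eq (s : List Char) (i : Nat) : pvOuterA s i = pvOuterL (s.drop i) := by
  unfold pvOuterA
  split
  · rename_i h
    rw [List.drop_eq_getElem_cons h]
    by_cases hsp : s[i] = ' '
    · rw [if_pos hsp, pvOuterA_eq s (i + 1)]
      simp [pvOuterL, hsp]
    · rw [if_neg hsp]
      have he := pvInnerA_spec s (i + 1)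
      have hge : i + 1 ≤ pvInnerA s (i + 1) := pvInnerA_ge s (i + 1)
      have hslice : PySem.List.slice s (some (i : Int)) (some ((pvInnerA s (i + 1)) : Int))
          = s[i] :: (s.drop (i + 1)).takeWhile pvP := by
        rw [PySem.List.slice_natCast]
        have h2 : pvInnerA s (i + 1) - i = ((s.drop (i + 1)).takeWhile pvP).length + 1 := by omega
        rw [h2, List.drop_eq_getElem_cons h, List.take_succ_cons, pvTake_len_takeWhile]
      have hdrop : s.drop (pvInnerA s (i + 1)) = (s.drop (i + 1)).dropWhile pvP := by
        rw [he, ← pvDrop_len_takeWhile (s.drop (i + 1)), List.drop_drop]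
      have hrec := pvOuterA_eq s (pvInnerA s (i + 1))
      show PySem.List.slice s (some (i : Int)) (some ((pvInnerA s (i + 1)) : Int))
            :: pvOuterA s (pvInnerA s (i + 1))
          = pvOuterL (s[i] :: s.drop (i + 1))
      rw [hrec, hslice, hdrop]
      rw [pvOuterL, if_neg hsp]
  · rename_i h
    rw [List.drop_eq_nil_of_le (by omega)]
    simp [pvOuterL]
termination_by s.length - i
decreasing_by
  · omega
  · have := pvInnerA_ge s (i + 1); omega

theorem pvAppendLast_snoc (as : List (List Char)) (t : List Char) (c : Char) :
    pvAppendLast (as ++ [t]) c = as ++ [t ++ [c]] := by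
  induction as with
  | nil => rfl
  | cons a as ih =>
    cases as with
    | nil => rfl
    | cons b bs => simpa [pvAppendLast] using ih

theorem pvIsalpha_ne_space (c : Char) (h : PySem.Chars.isalpha c = true) : c ≠ ' ' := by
  intro hc; subst hc; revert h; decide

theorem pvFoldl_snoc (l : List Char) (as : List (List Char)) (t : List Char) :
    List.foldl pvStepB (as ++ [t]) l
      = as ++ [t ++ l.takeWhile pvP] ++ pvOuterL (l.dropWhile pvP) := by
  induction l generalizing as t with
  | nil => simp [pvOuterL]
  | cons c rest ih =>
    by_cases ha : PySem.Chars.isalpha c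
    · have hP : pvP c = false := by simp [pvP, ha]
      have hne : c ≠ ' ' := pvIsalpha_ne_space c ha
      rw [List.foldl_cons]
      have hstep : pvStepB (as ++ [t]) c = (as ++ [t]) ++ [[c]] := by
        simp [pvStepB, ha]
      rw [hstep, ih (as ++ [t]) [c]]
      simp [hP, pvOuterL, hne]
    · have hP : pvP c = true := by simp [pvP, ha]
      rw [List.foldl_cons]
      have hstep : pvStepB (as ++ [t]) c = as ++ [t ++ [c]] := by
        simp [pvStepB, ha, pvAppendLast_snoc]
      rw [hstep, ih as (t ++ [c])]
      simp [hP]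
theorem pvFoldl_eq_outerL (l : List Char) (hh : ∀ c ∈ l.head?, c ≠ ' ') :
    List.foldl pvStepB [] l = pvOuterL l := by
  cases l with
  | nil => simp [pvOuterL]
  | cons c rest =>
    have hsp : c ≠ ' ' := hh c rfl
    rw [List.foldl_cons]
    have hstep : pvStepB [] c = [] ++ [[c]] := by simp [pvStepB]
    rw [hstep, pvFoldl_snoc rest [] [c]]
    simp [pvOuterL, hsp]

theorem pvOuterL_dropSpaces (l : List Char) :
    pvOuterL (l.dropWhile (· == ' ')) = pvOuterL l := by
  induction l with
  | nil => rfl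
  | cons c rest ih =>
    by_cases hsp : c = ' '
    · subst hsp
      rw [List.dropWhile_cons]
      simpa [pvOuterL] using ih
    · rw [List.dropWhile_cons]
      simp [hsp]

theorem pvHead_dropSpaces (l : List Char) :
    ∀ c ∈ (l.dropWhile (· == ' ')).head?, c ≠ ' ' := by
  intro c hc
  have := List.head?_dropWhile_not (· == ' ') l
  intro h; subst h
  rw [hc] at this
  simp at this

theorem primary_subsystems_spec : Claim_equal_primary_subsystems := by
  intro partition _
  unfold Spec_primary_subsystems primary_subsystems primary_subsystems_alt
  rw [pvOuterA_eq, List.drop_zero,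
      pvFoldl_eq_outerL _ (pvHead_dropSpaces partition.toList),
      pvOuterL_dropSpaces]
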